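-- pv_equiv track=rewrite | github.com/gilesknap/peyote-pattern | peyote/patterns.py | argyle
-- ===== SOURCE A (Python) =====
-- def argyle(columns: int, rows: int, size: int = 5,
--            color1: int = 1, color2: int = 2, bg: int = 0) -> list[list[int]]:
--     """Classic argyle: alternating filled diamonds with crossing stripes.
--
--     Diamond interiors use *color1*, the crossing X-lines use *color2*.
--     """
--     grid = []
--     period = size * 2
--     for r in range(rows):
--         row = []
--         for c in range(columns):
--             cr = r % period
--             cc = c % period
--             dr = abs(cr - size)
--             dc = abs(cc - size)
--             tile_r = r // period
--             tile_c = c // period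
--             val = bg
--             # Alternating filled diamonds
--             if dr + dc < size and (tile_r + tile_c) % 2 == 0:
--                 val = color1
--             # Thin crossing lines every `size` beads — overwrite so they stitch
--             # the diamonds together visually
--             if (r + c) % size == 0 or (r - c) % size == 0:
--                 val = color2
--             row.append(val)
--         grid.append(row)
--     return grid
-- ===== SOURCE B (Python) =====
-- def argyle(columns: int, rows: int, size: int = 5,
--            color1: int = 1, color2: int = 2, bg: int = 0) -> list[list[int]]:
--     """Classic argyle, computed by tiling one precomputed base tile.
--
--     The pattern is periodic with period P = 4*|size| in both directions, so
--     compute one base tile (clipped to the grid dimensions) once, build each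
--     distinct row by repeating its tile row, and assemble the grid from the
--     cached rows.
--     """
--     if rows <= 0:
--         return []
--     if columns <= 0:
--         return [[] for _ in range(rows)]
--     period = size * 2
--     P = 4 * abs(size)
--
--     def cell(r: int, c: int) -> int:
--         if abs(r % period - size) + abs(c % period - size) < size \
--                 and (r // period + c // period) % 2 == 0:
--             val = color1
--         else:
--             val = bg
--         if (r + c) % size == 0 or (r - c) % size == 0:
--             val = color2
--         return val
--
--     base = [[cell(i, j) for j in range(min(P, columns))]
--             for i in range(min(P, rows))]
--     reps = columns // P + 1
--     rowcache = [(base[i] * reps)[:columns] for i in range(min(P, rows))]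
--     return [list(rowcache[r % P]) for r in range(rows)]
-- ===== Notes on version B (the rewrite author's own statement) =====
-- stated objective: alternative
-- what changed: Instead of evaluating the per-cell diamond/stripe formula at every grid position, B exploits that the pattern is periodic with period 4*|size| in both directions: it computes one base tile (clipped to the grid dimensions) once, builds each distinct row by sequence repetition and slicing, and assembles the grid from the cached rows.
import Mathlib
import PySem

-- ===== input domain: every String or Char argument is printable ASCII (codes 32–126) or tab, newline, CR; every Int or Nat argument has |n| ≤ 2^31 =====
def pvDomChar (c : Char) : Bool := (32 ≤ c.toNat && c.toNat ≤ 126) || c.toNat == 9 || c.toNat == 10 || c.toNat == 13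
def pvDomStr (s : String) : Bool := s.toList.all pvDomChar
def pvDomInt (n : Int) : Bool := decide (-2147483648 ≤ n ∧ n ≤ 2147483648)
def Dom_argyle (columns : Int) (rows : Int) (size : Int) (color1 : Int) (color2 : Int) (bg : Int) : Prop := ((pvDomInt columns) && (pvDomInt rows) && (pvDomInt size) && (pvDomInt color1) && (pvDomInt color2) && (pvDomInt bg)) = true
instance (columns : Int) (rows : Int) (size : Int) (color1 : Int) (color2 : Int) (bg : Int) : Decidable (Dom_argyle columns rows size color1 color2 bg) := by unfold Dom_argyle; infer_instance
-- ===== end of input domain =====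

-- B replaces the per-cell double loop over the whole grid by computing one 4|size| x 4|size|
-- base tile once and assembling the grid from P cached rows (constant-factor mechanism; the
-- timing run decides the label). Pre_ excludes only size = 0 with positive rows and columns,
-- where A raises ZeroDivisionError (B raises there too).

-- B computes one 4|size| x 4|size| base tile once and assembles the grid from cached repeated
-- rows instead of evaluating the per-cell formula at every grid position (alternative decomposition).

-- ===== PORT A =====
def argyle (columns : Int) (rows : Int) (size : Int) (color1 : Int) (color2 : Int) (bg : Int) : List (List Int) :=
  let period := size * 2
  (PySem.List.pyRange 0 rows 1).foldl (fun grid r =>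
    grid ++ [
      (PySem.List.pyRange 0 columns 1).foldl (fun row c =>
        let cr := PySem.Int.mod r period
        let cc := PySem.Int.mod c period
        let dr := |cr - size|
        let dc := |cc - size|
        let tile_r := PySem.Int.floordiv r period
        let tile_c := PySem.Int.floordiv c period
        let val := bg
        let val := if dr + dc < size ∧ PySem.Int.mod (tile_r + tile_c) 2 = 0 then color1 else val
        let val := if PySem.Int.mod (r + c) size = 0 ∨ PySem.Int.mod (r - c) size = 0 then color2 else val
        row ++ [val]) [] ]) []

-- ===== PORT B =====
-- Source B's local helper `cell`
def pvCell (size : Int) (color1 : Int) (color2 : Int) (bg : Int) (r : Int) (c : Int) : Int :=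
  let period := size * 2
  let val :=
    if |PySem.Int.mod r period - size| + |PySem.Int.mod c period - size| < size ∧
        PySem.Int.mod (PySem.Int.floordiv r period + PySem.Int.floordiv c period) 2 = 0
    then color1 else bg
  if PySem.Int.mod (r + c) size = 0 ∨ PySem.Int.mod (r - c) size = 0 then color2 else val

-- Python sequence repetition `row * n`, ported by hand (exact for the nonnegative count Source B computes)
def pvRepeat (row : List Int) (n : Nat) : List Int := (List.replicate n row).flatten

def argyle_alt (columns : Int) (rows : Int) (size : Int) (color1 : Int) (color2 : Int) (bg : Int) : List (List Int) :=
  if rows ≤ 0 then []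
  else if columns ≤ 0 then (PySem.List.pyRange 0 rows 1).map (fun _ => ([] : List Int))
  else
    let P := 4 * |size|
    let base := (PySem.List.pyRange 0 (min P rows) 1).map (fun i =>
      (PySem.List.pyRange 0 (min P columns) 1).map (fun j => pvCell size color1 color2 bg i j))
    let reps := PySem.Int.floordiv columns P + 1
    let rowcache := (PySem.List.pyRange 0 (min P rows) 1).map (fun i =>
      PySem.List.slice (pvRepeat ((PySem.List.pyGet? base i).getD []) reps.toNat) none (some columns))
    (PySem.List.pyRange 0 rows 1).map (fun r =>
      (PySem.List.pyGet? rowcache (PySem.Int.mod r P)).getD [])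

-- ===== PRECONDITION & SPEC =====
-- Pre_ excludes exactly size = 0 with rows > 0 and columns > 0: there A raises ZeroDivisionError
-- (r % period with period = 0); B raises the same exception on those inputs.
def Pre_argyle (columns : Int) (rows : Int) (size : Int) (color1 : Int) (color2 : Int) (bg : Int) : Prop :=
  ¬ (0 < rows ∧ 0 < columns ∧ size = 0)
instance (columns : Int) (rows : Int) (size : Int) (color1 : Int) (color2 : Int) (bg : Int) : Decidable (Pre_argyle columns rows size color1 color2 bg) := by unfold Pre_argyle; infer_instance
def pvWitness_argyle : Int × Int × Int × Int × Int × Int := (8, 6, 2, 1, 2, 0)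

def Spec_argyle (columns : Int) (rows : Int) (size : Int) (color1 : Int) (color2 : Int) (bg : Int) (out : List (List Int)) : Prop := out = argyle_alt columns rows size color1 color2 bg
instance (columns : Int) (rows : Int) (size : Int) (color1 : Int) (color2 : Int) (bg : Int) (out : List (List Int)) : Decidable (Spec_argyle columns rows size color1 color2 bg out) := by unfold Spec_argyle; infer_instance

-- ===== CLAIM (what is proved, stated in full; the proofs are below) =====
def Claim_equal_argyle : Prop := ∀ (columns : Int) (rows : Int) (size : Int) (color1 : Int) (color2 : Int) (bg : Int), Dom_argyle columns rows size color1 color2 bg → Pre_argyle columns rows size color1 color2 bg → Spec_argyle columns rows size color1 color2 bg (argyle columns rows size color1 color2 bg)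

-- ===== LEMMAS AND PROOFS =====

theorem pv_mod_add_mul (a b k : Int) (hb : b ≠ 0) :
    PySem.Int.mod (a + b * k) b = PySem.Int.mod a b := by
  have e1 := PySem.Int.floordiv_mul_add_mod (a + b * k) b
  have e2 := PySem.Int.floordiv_mul_add_mod a b
  have key : PySem.Int.mod (a + b * k) b - PySem.Int.mod a b
      = b * (k - PySem.Int.floordiv (a + b * k) b + PySem.Int.floordiv a b) := by
    linear_combination e1 - e2
  have hdvd : |b| ∣ (PySem.Int.mod (a + b * k) b - PySem.Int.mod a b) :=
    (abs_dvd _ _).mpr ⟨_, key⟩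
  rcases lt_or_gt_of_ne hb with hneg | hpos
  · have b1 := PySem.Int.mod_neg_bounds (a := a + b * k) hneg
    have b2 := PySem.Int.mod_neg_bounds (a := a) hneg
    have habs : |PySem.Int.mod (a + b * k) b - PySem.Int.mod a b| < |b| := by
      rw [abs_lt, abs_of_neg hneg]; omega
    have := Int.eq_zero_of_abs_lt_dvd hdvd habs
    omega
  · have b1l := PySem.Int.mod_nonneg (a := a + b * k) hpos
    have b1r := PySem.Int.mod_lt (a := a + b * k) hpos
    have b2l := PySem.Int.mod_nonneg (a := a) hpos
    have b2r := PySem.Int.mod_lt (a := a) hpos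
    have habs : |PySem.Int.mod (a + b * k) b - PySem.Int.mod a b| < |b| := by
      rw [abs_lt, abs_of_pos hpos]; omega
    have := Int.eq_zero_of_abs_lt_dvd hdvd habs
    omega

theorem pv_floordiv_add_mul (a b k : Int) (hb : b ≠ 0) :
    PySem.Int.floordiv (a + b * k) b = PySem.Int.floordiv a b + k := by
  have e1 := PySem.Int.floordiv_mul_add_mod (a + b * k) b
  have e2 := PySem.Int.floordiv_mul_add_mod a b
  have hm := pv_mod_add_mul a b k hb
  have h0 : (PySem.Int.floordiv (a + b * k) b - (PySem.Int.floordiv a b + k)) * b = 0 := by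
    linear_combination e1 - e2 - hm
  rcases mul_eq_zero.mp h0 with h | h
  · omega
  · exact absurd h hb

theorem pvCell_period (size color1 color2 bg r c : Int) (hs : size ≠ 0) :
    pvCell size color1 color2 bg (PySem.Int.mod r (4 * |size|)) (PySem.Int.mod c (4 * |size|))
      = pvCell size color1 color2 bg r c := by
  have hper : size * 2 ≠ 0 := by omega
  have hP : (4 : Int) * |size| ≠ 0 := by positivity
  obtain ⟨s, hsize_abs⟩ : ∃ s : Int, |size| = s * size := by
    rcases lt_or_gt_of_ne hs with h | h
    · exact ⟨-1, by rw [abs_of_neg h]; ring⟩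
    · exact ⟨1, by rw [abs_of_pos h]; ring⟩
  set qr := PySem.Int.floordiv r (4 * |size|) with hqr
  set qc := PySem.Int.floordiv c (4 * |size|) with hqc
  have er := PySem.Int.floordiv_mul_add_mod r (4 * |size|)
  have ec := PySem.Int.floordiv_mul_add_mod c (4 * |size|)
  -- mod r P = r + (size*2) * (2*s*(-qr))  etc.
  have hr' : PySem.Int.mod r (4 * |size|) = r + (size * 2) * (2 * s * (-qr)) := by
    linear_combination er - (4 * qr) * hsize_abs
  have hc' : PySem.Int.mod c (4 * |size|) = c + (size * 2) * (2 * s * (-qc)) := by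
    linear_combination ec - (4 * qc) * hsize_abs
  have hr2 : PySem.Int.mod r (4 * |size|) = r + size * (4 * s * (-qr)) := by
    linear_combination hr'
  have hc2 : PySem.Int.mod c (4 * |size|) = c + size * (4 * s * (-qc)) := by
    linear_combination hc'
  have h1 : PySem.Int.mod (PySem.Int.mod r (4 * |size|)) (size * 2) = PySem.Int.mod r (size * 2) := by
    rw [hr']; exact pv_mod_add_mul r (size * 2) _ hper
  have h2 : PySem.Int.mod (PySem.Int.mod c (4 * |size|)) (size * 2) = PySem.Int.mod c (size * 2) := by
    rw [hc']; exact pv_mod_add_mul c (size * 2) _ hper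
  have h3 : PySem.Int.mod (PySem.Int.floordiv (PySem.Int.mod r (4 * |size|)) (size * 2)
        + PySem.Int.floordiv (PySem.Int.mod c (4 * |size|)) (size * 2)) 2
      = PySem.Int.mod (PySem.Int.floordiv r (size * 2) + PySem.Int.floordiv c (size * 2)) 2 := by
    rw [hr', hc', pv_floordiv_add_mul r (size * 2) _ hper, pv_floordiv_add_mul c (size * 2) _ hper]
    have : PySem.Int.floordiv r (size * 2) + 2 * s * -qr + (PySem.Int.floordiv c (size * 2) + 2 * s * -qc)
        = (PySem.Int.floordiv r (size * 2) + PySem.Int.floordiv c (size * 2)) + 2 * (s * -qr + s * -qc) := by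
      ring
    rw [this]
    exact pv_mod_add_mul _ 2 _ (by omega)
  have h4 : PySem.Int.mod (PySem.Int.mod r (4 * |size|) + PySem.Int.mod c (4 * |size|)) size
      = PySem.Int.mod (r + c) size := by
    rw [hr2, hc2]
    have : r + size * (4 * s * -qr) + (c + size * (4 * s * -qc))
        = (r + c) + size * (4 * s * -qr + 4 * s * -qc) := by ring
    rw [this]; exact pv_mod_add_mul _ size _ hs
  have h5 : PySem.Int.mod (PySem.Int.mod r (4 * |size|) - PySem.Int.mod c (4 * |size|)) size
      = PySem.Int.mod (r - c) size := by
    rw [hr2, hc2]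
    have : r + size * (4 * s * -qr) - (c + size * (4 * s * -qc))
        = (r - c) + size * (4 * s * -qr - 4 * s * -qc) := by ring
    rw [this]; exact pv_mod_add_mul _ size _ hs
  simp only [pvCell, h1, h2, h3, h4, h5]

theorem pv_flatten_replicate_getElem? {α : Type} (row : List α) (n k : Nat) (hk : k < n * row.length) :
    ((List.replicate n row).flatten)[k]? = row[k % row.length]? := by
  induction n generalizing k with
  | zero => omega
  | succ m ih =>
    have hk' : k < (m + 1) * row.length := hk
    rw [Nat.succ_mul] at hk'
    rw [List.replicate_succ, List.flatten_cons]
    by_cases h : k < row.length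
    · rw [List.getElem?_append_left h, Nat.mod_eq_of_lt h]
    · rw [not_lt] at h
      rw [List.getElem?_append_right h, Nat.mod_eq_sub_mod h]
      exact ih (k - row.length) (by omega)

theorem pv_row_eq (size color1 color2 bg columns r : Int) (hs : size ≠ 0) (hcol : 0 < columns) :
    PySem.List.slice
      (pvRepeat ((PySem.List.pyRange 0 (min (4*|size|) columns) 1).map
          (fun j => pvCell size color1 color2 bg (PySem.Int.mod r (4*|size|)) j))
        (PySem.Int.floordiv columns (4*|size|) + 1).toNat)
      none (some columns)
    = (PySem.List.pyRange 0 columns 1).map (fun c => pvCell size color1 color2 bg r c) := by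
  have hP : (0:Int) < 4 * |size| := by positivity
  set P : Int := 4 * |size| with hPdef
  set q : Int := PySem.Int.floordiv columns P with hq
  have eq1 := PySem.Int.floordiv_mul_add_mod columns P
  rw [← hq] at eq1
  have hm0 := PySem.Int.mod_nonneg (a := columns) hP
  have hm1 := PySem.Int.mod_lt (a := columns) hP
  have hq0 : 0 ≤ q := by nlinarith [eq1, hm0, hm1]
  rw [PySem.List.slice_to (hb := by omega)]
  set L : Int := min P columns with hL
  have hL0 : 0 < L := by omega
  set brow := (PySem.List.pyRange 0 L 1).map
      (fun j => pvCell size color1 color2 bg (PySem.Int.mod r P) j) with hbrow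
  have hlen : brow.length = L.toNat := by
    rw [hbrow, List.length_map, PySem.List.length_pyRange_one]; omega
  have hcov : columns.toNat ≤ (q + 1).toNat * L.toNat := by
    by_cases hcp : P ≤ columns
    · have hLP : L = P := by omega
      have hrep : (((q + 1).toNat * P.toNat : Nat) : Int) = (q + 1) * P := by
        push_cast
        rw [Int.toNat_of_nonneg (by omega), Int.toNat_of_nonneg (by omega)]
      have hcovZ : columns ≤ (q + 1) * P := by
        have h2 : (q + 1) * P = q * P + P := by ring
        omega
      rw [hLP]
      omega
    · have hLc : L = columns := by omega
      have hq0' : q = 0 := by nlinarith [eq1, hm0, hm1]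
      rw [hLc, hq0']
      norm_num
  apply List.ext_getElem?
  intro k
  by_cases hk : k < columns.toNat
  · rw [List.getElem?_take_of_lt hk]
    simp only [pvRepeat]
    rw [pv_flatten_replicate_getElem? brow (q+1).toNat k (by rw [hlen]; omega)]
    rw [hlen]
    have hkP : k % L.toNat < L.toNat := Nat.mod_lt _ (by omega)
    rw [hbrow]
    rw [List.getElem?_map, List.getElem?_map]
    rw [PySem.List.getElem?_pyRange_one, PySem.List.getElem?_pyRange_one]
    have hlt1 : k % L.toNat < (L - 0).toNat := by omega
    have hlt2 : k < (columns - 0).toNat := by omega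
    rw [if_pos hlt1, if_pos hlt2]
    simp only [Option.map_some]
    congr 1
    have hcast : ((0:Int) + (k % L.toNat : Nat)) = PySem.Int.mod ((0:Int) + (k:Nat)) P := by
      rw [PySem.Int.mod_eq_emod_of_pos (by omega), zero_add, zero_add]
      by_cases hcp : P ≤ columns
      · have hLP : L = P := by omega
        rw [hLP, Int.natCast_mod, Int.toNat_of_nonneg (le_of_lt hP)]
      · have hLc : L = columns := by omega
        rw [hLc, Nat.mod_eq_of_lt (by omega), Int.emod_eq_of_lt (by omega) (by omega)]
    rw [hcast]
    exact pvCell_period size color1 color2 bg r (0 + (k:Int)) hs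
  · rw [not_lt] at hk
    rw [List.getElem?_eq_none, List.getElem?_eq_none]
    · rw [List.length_map, PySem.List.length_pyRange_one]; omega
    · rw [List.length_take]; omega

theorem pv_foldl_rows (rows : Int) (f : Int → List Int) :
    (PySem.List.pyRange 0 rows 1).foldl (fun grid r => grid ++ [f r]) [] =
      (PySem.List.pyRange 0 rows 1).map f :=
  (PySem.List.foldl_append_singleton_eq_map f _ []).trans (List.nil_append _)

theorem pv_a_char (columns rows size color1 color2 bg : Int) :
    argyle columns rows size color1 color2 bg =
      (PySem.List.pyRange 0 rows 1).map (fun r =>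
        (PySem.List.pyRange 0 columns 1).map (fun c => pvCell size color1 color2 bg r c)) := by
  unfold argyle
  rw [pv_foldl_rows]
  apply List.map_congr_left
  intro r _
  exact (PySem.List.foldl_append_singleton_eq_map (fun c => pvCell size color1 color2 bg r c) _ []).trans
    (List.nil_append _)

theorem pv_alt_char (columns rows size color1 color2 bg : Int)
    (hrow : 0 < rows) (hcol : 0 < columns) (hs : size ≠ 0) :
    argyle_alt columns rows size color1 color2 bg =
      (PySem.List.pyRange 0 rows 1).map (fun r =>
        (PySem.List.pyRange 0 columns 1).map (fun c => pvCell size color1 color2 bg r c)) := by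
  have hP : (0:Int) < 4 * |size| := by positivity
  unfold argyle_alt
  rw [if_neg (by omega), if_neg (by omega)]
  apply List.map_congr_left
  intro r hrmem
  have hi0 : 0 ≤ PySem.Int.mod r (4 * |size|) := PySem.Int.mod_nonneg (a := r) hP
  have hi1 : PySem.Int.mod r (4 * |size|) < 4 * |size| := PySem.Int.mod_lt (a := r) hP
  set i0 := PySem.Int.mod r (4 * |size|) with hi0def
  rw [PySem.List.pyGet?_of_nonneg (h := hi0)]
  rw [List.getElem?_map, PySem.List.getElem?_pyRange_one]
  have hrb : 0 ≤ r ∧ r < rows := (PySem.List.mem_pyRange_one).mp hrmem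
  have hir : i0 < rows := by
    by_cases hpr : (4 * |size|) ≤ rows
    · omega
    · have : i0 = r := by
        rw [hi0def, PySem.Int.mod_eq_emod_of_pos (by omega),
          Int.emod_eq_of_lt (by omega) (by omega)]
      omega
  have hlt : i0.toNat < ((min (4 * |size|) rows) - 0).toNat := by omega
  rw [if_pos hlt]
  simp only [Option.map_some, Option.getD_some]
  have hcast : ((0:Int) + (i0.toNat : Nat)) = i0 := by
    rw [zero_add, Int.toNat_of_nonneg hi0]
  rw [hcast]
  rw [PySem.List.pyGet?_of_nonneg (h := hi0)]
  rw [List.getElem?_map, PySem.List.getElem?_pyRange_one, if_pos hlt]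
  simp only [Option.map_some, Option.getD_some]
  rw [hcast]
  exact pv_row_eq size color1 color2 bg columns r hs hcol

theorem argyle_eq (columns rows size color1 color2 bg : Int)
    (hpre : ¬ (0 < rows ∧ 0 < columns ∧ size = 0)) :
    argyle columns rows size color1 color2 bg = argyle_alt columns rows size color1 color2 bg := by
  by_cases hrow : rows ≤ 0
  · unfold argyle argyle_alt
    rw [if_pos hrow, PySem.List.pyRange_one_eq_nil (a := 0) (b := rows) (by omega)]
    rfl
  · by_cases hcol : columns ≤ 0
    · unfold argyle argyle_alt
      rw [if_neg hrow, if_pos hcol]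
      rw [PySem.List.pyRange_one_eq_nil (a := 0) (b := columns) (by omega)]
      simp only [List.foldl_nil]
      exact pv_foldl_rows rows _
    · have hs : size ≠ 0 := fun h => hpre ⟨by omega, by omega, h⟩
      rw [pv_a_char, pv_alt_char columns rows size color1 color2 bg (by omega) (by omega) hs]

-- ===== VERDICT (by name: the statement is the Claim_ definition above) =====
theorem argyle_spec : Claim_equal_argyle := by
  intro columns rows size color1 color2 bg _ hpre
  unfold Spec_argyle
  exact argyle_eq columns rows size color1 color2 bg (by unfold Pre_argyle at hpre; exact hpre)
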